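-- pv_equiv track=rewrite | github.com/ToledoVitor/hacker-rank-solutions | python/find-the-letters.py | find_the_letters
-- ===== SOURCE A (Python) =====
-- def find_the_letters(array: list) -> list:
--     '''
--     Returns the letters that are present in all the given strings.
--     Also consider repetition, and returns if are two of the same letter
--     in all words.
--
--     :array - list[str]
--     :return - list[str]
--     '''
--
--     testing_array = [list(name) for name in array]
--     base_string = testing_array[0]
--
--     solution = []
--     while len(base_string) > 0:
--         letter = base_string.pop()
--         in_all_words = True
--
--         for name in testing_array[1:]:
--             try:
--                 name.remove(letter)
--             except:
--                 in_all_words = False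
--
--         if in_all_words:
--             solution.append(letter)
--
--     return sorted(solution)
-- ===== SOURCE B (Python) =====
-- def find_the_letters(array: list) -> list:
--     '''
--     Returns the letters present in all given strings, with multiplicity
--     (min count across words), sorted.
--     '''
--     cur = sorted(array[0])
--     for name in array[1:]:
--         other = sorted(name)
--         merged = []
--         i = j = 0
--         while i < len(cur) and j < len(other):
--             if cur[i] == other[j]:
--                 merged.append(cur[i])
--                 i += 1
--                 j += 1
--             elif cur[i] < other[j]:
--                 i += 1
--             else:
--                 j += 1
--         cur = merged
--     return cur
-- ===== Notes on version B (the rewrite author's own statement) =====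
-- stated objective: faster
-- what changed: Replaces the pop/remove destructive scan (repeated linear remove per popped letter) by sorting each word once and threading a two-pointer merge-intersection of sorted character sequences, which yields the sorted result directly.
import Mathlib
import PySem

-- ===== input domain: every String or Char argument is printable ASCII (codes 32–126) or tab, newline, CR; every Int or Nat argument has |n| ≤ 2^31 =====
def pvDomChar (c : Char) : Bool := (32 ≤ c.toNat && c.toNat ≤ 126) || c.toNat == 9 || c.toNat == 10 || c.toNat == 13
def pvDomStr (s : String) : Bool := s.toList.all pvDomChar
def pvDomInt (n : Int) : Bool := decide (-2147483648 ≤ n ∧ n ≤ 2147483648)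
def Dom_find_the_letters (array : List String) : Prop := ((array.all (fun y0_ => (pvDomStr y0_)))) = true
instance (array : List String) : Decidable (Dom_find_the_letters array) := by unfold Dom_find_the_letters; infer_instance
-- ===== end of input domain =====

-- B replaces A's pop/remove destructive scans by sort-once + two-pointer merge intersection; equivalence is about the return value (A mutates only local copies).

-- ===== PORT A =====
-- 'for name in testing_array[1:]: try: name.remove(letter) except: in_all_words = False'
def pvRemoveAll (letter : Char) (others : List (List Char)) : List (List Char) × Bool :=
  others.foldl (fun acc n =>
    match PySem.List.remove? n letter with
    | some n' => (acc.1 ++ [n'], acc.2)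
    | none => (acc.1 ++ [n], false)) ([], true)

-- the while loop: 'letter = base_string.pop()', filter through the other words
def pvLoopA (base : List Char) (others : List (List Char)) (sol : List Char) : List Char :=
  match h : base.getLast? with
  | none => sol
  | some letter =>
    let r := pvRemoveAll letter others
    pvLoopA base.dropLast r.1 (if r.2 then sol ++ [letter] else sol)
  termination_by base.length
  decreasing_by
    cases base with
    | nil => simp at h
    | cons b bs => simp

def find_the_letters (array : List String) : List String :=
  match array with
  | [] => []  -- unreachable under Pre_ (Python raises IndexError)
  | a0 :: rest =>
    let sol := pvLoopA a0.toList (rest.map String.toList) []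
    (PySem.List.sorted sol (fun c => c) false).map (fun c => String.ofList [c])

-- ===== PORT B =====
-- the two-pointer while loop of Source B as recursion on the two sorted lists
def pvMerge2 : List Char → List Char → List Char
  | [], _ => []
  | _ :: _, [] => []
  | x :: xs, y :: ys =>
    if x = y then x :: pvMerge2 xs ys
    else if x < y then pvMerge2 xs (y :: ys)
    else pvMerge2 (x :: xs) ys

def find_the_letters_alt (array : List String) : List String :=
  match array with
  | [] => []  -- unreachable under Pre_ (Python raises IndexError)
  | a0 :: rest =>
    (rest.foldl (fun cur name => pvMerge2 cur (PySem.List.sorted name.toList (fun c => c) false))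
      (PySem.List.sorted a0.toList (fun c => c) false)).map (fun c => String.ofList [c])

-- ===== PRECONDITION & SPEC =====
-- Pre_ excludes only the empty list, on which A raises IndexError (array[0]); B raises there too.
def Pre_find_the_letters (array : List String) : Prop := array ≠ []
instance (array : List String) : Decidable (Pre_find_the_letters array) := by unfold Pre_find_the_letters; infer_instance
def pvWitness_find_the_letters : List String := ["aabc", "baca"]

def Spec_find_the_letters (array : List String) (out : List String) : Prop := out = find_the_letters_alt array
instance (array : List String) (out : List String) : Decidable (Spec_find_the_letters array out) := by unfold Spec_find_the_letters; infer_instance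

-- ===== CLAIM (what is proved, stated in full; the proofs are below) =====
def Claim_equal_find_the_letters : Prop := ∀ (array : List String), Dom_find_the_letters array → Pre_find_the_letters array → Spec_find_the_letters array (find_the_letters array)

-- ===== LEMMAS AND PROOFS =====

-- the common characterisation: fold of min-count of c over the remaining words, seeded by i
def pvM (c : Char) (ws : List (List Char)) (i : Nat) : Nat :=
  ws.foldr (fun o m => min (o.count c) m) i

theorem pvM_zero (c : Char) (ws : List (List Char)) : pvM c ws 0 = 0 := by
  induction ws with
  | nil => rfl
  | cons w ws ih => simp [pvM] at *; simp [ih]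

theorem pvM_le_of_mem {c : Char} {ws : List (List Char)} {o : List Char} (h : o ∈ ws) (i : Nat) :
    pvM c ws i ≤ o.count c := by
  induction ws with
  | nil => simp at h
  | cons w ws ih =>
    simp only [pvM, List.foldr_cons] at *
    rcases List.mem_cons.1 h with h | h
    · subst h; exact min_le_left _ _
    · exact le_trans (min_le_right _ _) (ih h)

theorem pvM_min (c : Char) (ws : List (List Char)) (a b : Nat) :
    pvM c ws (min a b) = min (pvM c ws a) b := by
  induction ws with
  | nil => rfl
  | cons w ws ih =>
    simp only [pvM, List.foldr_cons] at *
    rw [ih, min_assoc]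

theorem pvM_map_congr (c : Char) (f : List Char → List Char) (ws : List (List Char)) (i : Nat)
    (h : ∀ n ∈ ws, (f n).count c = n.count c) :
    pvM c (ws.map f) i = pvM c ws i := by
  induction ws with
  | nil => rfl
  | cons w ws ih =>
    simp only [pvM, List.map_cons, List.foldr_cons] at *
    rw [h w (by simp), ih (fun n hn => h n (by simp [hn]))]

theorem pvM_map_sub_one (c : Char) (f : List Char → List Char) (ws : List (List Char)) (i : Nat)
    (h : ∀ n ∈ ws, (f n).count c + 1 = n.count c) :
    pvM c (ws.map f) i + 1 = pvM c ws (i + 1) := by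
  induction ws with
  | nil => rfl
  | cons w ws ih =>
    simp only [pvM, List.map_cons, List.foldr_cons] at *
    rw [← Nat.add_min_add_right, h w (by simp), ih (fun n hn => h n (by simp [hn]))]

theorem pvRemoveAll_eq (x : Char) (others : List (List Char)) :
    pvRemoveAll x others =
      (others.map (fun n => if x ∈ n then n.erase x else n),
       others.all (fun n => decide (x ∈ n))) := by
  suffices h : ∀ (init : List (List Char) × Bool),
      others.foldl (fun acc n =>
        match PySem.List.remove? n x with
        | some n' => (acc.1 ++ [n'], acc.2)
        | none => (acc.1 ++ [n], false)) init
      = (init.1 ++ others.map (fun n => if x ∈ n then n.erase x else n),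
         init.2 && others.all (fun n => decide (x ∈ n))) by
    simpa [pvRemoveAll] using h ([], true)
  induction others with
  | nil => intro init; simp
  | cons o os ih =>
    intro init
    simp only [List.foldl_cons]
    by_cases hm : x ∈ o
    · rw [PySem.List.remove?_eq_some_erase o x hm]
      simp [ih, hm]
    · rw [(PySem.List.remove?_eq_none_iff o x).2 hm]
      simp [ih, hm]

theorem pvLoopA_concat (bs : List Char) (b : Char) (others : List (List Char)) (sol : List Char) :
    pvLoopA (bs ++ [b]) others sol
      = pvLoopA bs (pvRemoveAll b others).1
          (if (pvRemoveAll b others).2 then sol ++ [b] else sol) := by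
  rw [pvLoopA]
  split
  · next h => simp at h
  · next letter h =>
      rw [List.getLast?_concat] at h
      cases h
      simp

theorem pvLoopA_count (c : Char) (base : List Char) :
    ∀ (others : List (List Char)) (sol : List Char),
      (pvLoopA base others sol).count c = sol.count c + pvM c others (base.count c) := by
  induction base using List.reverseRecOn with
  | nil =>
    intro others sol
    rw [pvLoopA]
    simp [pvM_zero]
  | append_singleton bs b ih =>
    intro others sol
    rw [pvLoopA_concat, pvRemoveAll_eq, ih]
    by_cases hall : ∀ n ∈ others, b ∈ n
    · have hflag : others.all (fun n => decide (b ∈ n)) = true := by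
        simp [List.all_eq_true]; exact hall
      simp only [hflag, if_pos]
      by_cases hc : c = b
      · subst hc
        have hmap : ∀ n ∈ others, ((if c ∈ n then n.erase c else n).count c) + 1 = n.count c := by
          intro n hn
          have hm := hall n hn
          simp [hm, List.count_erase_self, Nat.sub_add_cancel (List.count_pos_iff.2 hm)]
        have hM := pvM_map_sub_one c _ others (bs.count c) hmap
        have h1 : (bs ++ [c]).count c = bs.count c + 1 := by simp
        have h2 : (sol ++ [c]).count c = sol.count c + 1 := by simp
        rw [h1, h2, ← hM]
        omega
      · have hmap : ∀ n ∈ others, ((if b ∈ n then n.erase b else n).count c) = n.count c := by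
          intro n hn
          simp [hall n hn, List.count_erase_of_ne hc]
        have h1 : (bs ++ [b]).count c = bs.count c := by
          simp [List.count_append, List.count_singleton', Ne.symm hc]
        have h2 : (sol ++ [b]).count c = sol.count c := by
          simp [List.count_append, List.count_singleton', Ne.symm hc]
        rw [h1, h2, pvM_map_congr c _ _ _ hmap]
    · push_neg at hall
      obtain ⟨n0, hn0, hb0⟩ := hall
      have hflag : others.all (fun n => decide (b ∈ n)) = false := by
        simp [List.all_eq_true]; exact ⟨n0, hn0, hb0⟩
      simp only [hflag, Bool.false_eq_true, if_false]
      by_cases hc : c = b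
      · subst hc
        have hf0 : (if c ∈ n0 then n0.erase c else n0) = n0 := by simp [hb0]
        have h1 : pvM c (others.map (fun n => if c ∈ n then n.erase c else n)) (bs.count c) = 0 := by
          have hmem : (if c ∈ n0 then n0.erase c else n0) ∈ others.map (fun n => if c ∈ n then n.erase c else n) :=
            List.mem_map_of_mem hn0
          have hle := pvM_le_of_mem (c := c) hmem (bs.count c)
          rw [hf0, List.count_eq_zero_of_not_mem hb0] at hle
          omega
        have h2 : pvM c others ((bs ++ [c]).count c) = 0 := by
          have hle := pvM_le_of_mem (c := c) hn0 ((bs ++ [c]).count c)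
          rw [List.count_eq_zero_of_not_mem hb0] at hle
          omega
        rw [h1, h2]
      · have hmap : ∀ n ∈ others, ((if b ∈ n then n.erase b else n).count c) = n.count c := by
          intro n hn
          by_cases hbn : b ∈ n
          · simp [hbn, List.count_erase_of_ne hc]
          · simp [hbn]
        have h1 : (bs ++ [b]).count c = bs.count c := by
          simp [List.count_append, List.count_singleton', Ne.symm hc]
        rw [h1, pvM_map_congr c _ _ _ hmap]

theorem pvMerge2_sublist (xs ys : List Char) : (pvMerge2 xs ys).Sublist xs := by
  fun_induction pvMerge2 xs ys with
  | case1 ys => simp [pvMerge2]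
  | case2 h t => simp [pvMerge2]
  | case3 xs y ys ih => simpa [pvMerge2] using ih.cons₂ y
  | case4 x xs y ys hne hlt ih => simpa [pvMerge2, hne, hlt] using ih.cons x
  | case5 x xs y ys hne hlt ih => simpa [pvMerge2, hne, hlt] using ih

theorem pvMerge2_count (c : Char) (xs ys : List Char) :
    xs.Pairwise (· ≤ ·) → ys.Pairwise (· ≤ ·) →
    (pvMerge2 xs ys).count c = min (xs.count c) (ys.count c) := by
  fun_induction pvMerge2 xs ys with
  | case1 ys => intro _ _; simp [pvMerge2]
  | case2 h t => intro _ _; simp [pvMerge2]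
  | case3 xs y ys ih =>
    intro hxs hys
    rw [List.count_cons, ih hxs.of_cons hys.of_cons]
    by_cases hc : c = y <;> simp [List.count_cons, hc] <;> omega
  | case4 x xs y ys hne hlt ih =>
    intro hxs hys
    rw [ih hxs.of_cons hys]
    by_cases hc : c = x
    · subst hc
      have hnin : c ∉ y :: ys := by
        intro hmem
        rcases List.mem_cons.1 hmem with h | h
        · exact hne h
        · exact absurd (lt_of_lt_of_le hlt (List.rel_of_pairwise_cons hys h)) (lt_irrefl c)
      rw [List.count_eq_zero_of_not_mem hnin]
      simp
    · rw [List.count_cons]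
      simp [Ne.symm hc]
  | case5 x xs y ys hne hlt ih =>
    intro hxs hys
    rw [ih hxs hys.of_cons]
    by_cases hc : c = y
    · subst hc
      have hgt : c < x := lt_of_le_of_ne (not_lt.1 hlt) (fun h => hne h.symm)
      have hnin : c ∉ x :: xs := by
        intro hmem
        rcases List.mem_cons.1 hmem with h | h
        · exact absurd (h ▸ hgt) (lt_irrefl _)
        · exact absurd (lt_of_lt_of_le hgt (List.rel_of_pairwise_cons hxs h)) (lt_irrefl c)
      rw [List.count_eq_zero_of_not_mem hnin]
      simp
    · simp [List.count_cons, Ne.symm hc]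

theorem pvFoldB (ws : List String) :
    ∀ (cur : List Char), cur.Pairwise (· ≤ ·) →
      (ws.foldl (fun c name => pvMerge2 c (PySem.List.sorted name.toList (fun x => x) false)) cur).Pairwise (· ≤ ·) ∧
      ∀ ch, (ws.foldl (fun c name => pvMerge2 c (PySem.List.sorted name.toList (fun x => x) false)) cur).count ch
            = pvM ch (ws.map String.toList) (cur.count ch) := by
  induction ws with
  | nil => intro cur h; exact ⟨h, fun ch => rfl⟩
  | cons w ws ih =>
    intro cur h
    have hsw : (PySem.List.sorted w.toList (fun x => x) false).Pairwise (· ≤ ·) :=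
      PySem.List.sorted_pairwise w.toList (fun x => x)
    have hm : (pvMerge2 cur (PySem.List.sorted w.toList (fun x => x) false)).Pairwise (· ≤ ·) :=
      h.sublist (pvMerge2_sublist _ _)
    obtain ⟨h1, h2⟩ := ih (pvMerge2 cur (PySem.List.sorted w.toList (fun x => x) false)) hm
    refine ⟨h1, fun ch => ?_⟩
    rw [List.foldl_cons, h2 ch, pvMerge2_count ch _ _ h hsw,
        (PySem.List.sorted_perm w.toList (fun x => x) false).count_eq]
    rw [pvM_min]
    simp [pvM, Nat.min_comm]

-- ===== VERDICT (by name: the statement is the Claim_ definition above) =====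
theorem find_the_letters_spec : Claim_equal_find_the_letters := by
  intro array _ hpre
  unfold Spec_find_the_letters
  match array with
  | [] => exact absurd rfl hpre
  | a0 :: rest =>
    simp only [find_the_letters, find_the_letters_alt]
    congr 1
    have hcur0 : (PySem.List.sorted a0.toList (fun c => c) false).Pairwise (· ≤ ·) :=
      PySem.List.sorted_pairwise a0.toList (fun x => x)
    obtain ⟨hp, hc⟩ := pvFoldB rest _ hcur0
    refine PySem.List.sorted_id_eq_of_perm_of_pairwise _ _ ?_ hp
    refine List.perm_iff_count.2 (fun c => ?_)
    rw [hc c, pvLoopA_count c, (PySem.List.sorted_perm a0.toList (fun x => x) false).count_eq]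
    simp
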